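-- pv_equiv track=rewrite | github.com/Geaux-Specialist-L-L-C/GA-MVP | scripts/export_repo_content.py | should_ignore
-- ===== SOURCE A (Python) =====
-- def should_ignore(path):
--     """Check if the path should be ignored."""
--     ignore_dirs = {
--         '.git',
--         'node_modules',
--         '__pycache__',
--         '.pytest_cache',
--         'dist',
--         'build',
--         '.next',
--         'venv',
--         '.venv',
--         'backend',
--         'docs',
--         'scripts'
--     }
--
--     path_str = str(path)
--     return any(f'/{d}/' in path_str or path_str.endswith(f'/{d}') for d in ignore_dirs)
-- ===== SOURCE B (Python) =====
-- IGNORE_DIRS = frozenset(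
--     '.git node_modules __pycache__ .pytest_cache dist build .next venv .venv '
--     'backend docs scripts'.split()
-- )
--
--
-- def _scan(rest):
--     """Examine the component that follows each '/' in turn."""
--     i = rest.find('/')
--     if i == -1:
--         return False
--     tail = rest[i + 1:]
--     j = tail.find('/')
--     comp = tail if j == -1 else tail[:j]
--     return comp in IGNORE_DIRS or _scan(tail)
--
--
-- def should_ignore(path):
--     """Check if the path should be ignored."""
--     return _scan(str(path))
-- ===== Notes on version B (the rewrite author's own statement) =====
-- stated objective: alternative
-- what changed: Instead of scanning the whole path string once per ignore name (substring and endswith tests), B walks the path itself: it recursively finds each '/', extracts the single component that follows it, and tests that component for membership in a frozenset.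
import Mathlib
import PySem

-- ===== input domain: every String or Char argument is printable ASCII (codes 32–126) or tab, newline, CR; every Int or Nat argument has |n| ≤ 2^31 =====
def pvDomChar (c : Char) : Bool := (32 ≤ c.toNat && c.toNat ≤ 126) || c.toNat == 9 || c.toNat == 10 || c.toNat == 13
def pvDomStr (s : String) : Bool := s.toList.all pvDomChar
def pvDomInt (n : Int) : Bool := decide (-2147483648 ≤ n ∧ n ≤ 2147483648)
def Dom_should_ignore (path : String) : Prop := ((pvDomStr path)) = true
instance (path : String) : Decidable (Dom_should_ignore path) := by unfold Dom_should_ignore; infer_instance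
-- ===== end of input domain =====

-- B walks the path itself: it recursively finds each '/', extracts the single component that
-- follows it, and tests that component for set membership, instead of scanning the whole
-- string once per ignore name as A does.


-- ===== PORT A =====
-- the set literal 'ignore_dirs' (all elements distinct; any() over it is order-independent)
def ignoreDirsA : List (List Char) :=
  PySem.Set.ofList
    [".git".toList, "node_modules".toList, "__pycache__".toList, ".pytest_cache".toList,
     "dist".toList, "build".toList, ".next".toList, "venv".toList, ".venv".toList,
     "backend".toList, "docs".toList, "scripts".toList]

def should_ignore (path : String) : Bool :=
  -- any(f'/{d}/' in path_str or path_str.endswith(f'/{d}') for d in ignore_dirs)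
  ignoreDirsA.any (fun d =>
    PySem.Chars.isIn ('/' :: d ++ ['/']) path.toList || PySem.Chars.endswith path.toList ('/' :: d))

-- ===== PORT B =====
-- IGNORE_DIRS = frozenset('…'.split())
def ignoreDirsB : PySem.Set (List Char) :=
  PySem.Set.ofList
    (PySem.Chars.split₀
      (".git node_modules __pycache__ .pytest_cache dist build .next venv .venv backend docs scripts".toList))

-- _scan(rest): find the next '/', take the component after it, test it, recurse on the tail
def scanB (rest : List Char) : Bool :=
  let i := PySem.Chars.find rest ['/']
  if hi : i = -1 then false
  else
    let tail := PySem.List.slice rest (some (i + 1)) none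
    let j := PySem.Chars.find tail ['/']
    let comp := if j = -1 then tail else PySem.List.slice tail none (some j)
    PySem.Set.contains ignoreDirsB comp || scanB tail
termination_by rest.length
decreasing_by
  have hi' : PySem.Chars.find rest ['/'] ≠ -1 := hi
  have h0 : (0:Int) ≤ PySem.Chars.find rest ['/'] := by
    have := PySem.Chars.neg_one_le_find rest ['/']
    omega
  have hne : rest ≠ [] := by
    intro h
    subst h
    have hinf : (['/'] : List Char) <:+: [] := (PySem.Chars.find_ne_neg_one_iff _ _).mp hi'
    have := hinf.sublist
    simp at this
  have hlen : 0 < rest.length := List.length_pos_iff.mpr hne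
  rw [PySem.List.slice_from rest (show (0:Int) ≤ PySem.Chars.find rest ['/'] + 1 by omega),
    List.length_drop]
  omega

def should_ignore_alt (path : String) : Bool := scanB path.toList

-- ===== PRECONDITION & SPEC =====
def Spec_should_ignore (path : String) (out : Bool) : Prop := out = should_ignore_alt path
instance (path : String) (out : Bool) : Decidable (Spec_should_ignore path out) := by unfold Spec_should_ignore; infer_instance

-- ===== CLAIM (what is proved, stated in full; the proofs are below) =====
def Claim_equal_should_ignore : Prop := ∀ (path : String), Dom_should_ignore path → Spec_should_ignore path (should_ignore path)

-- ===== LEMMAS AND PROOFS =====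

-- the two ignore collections hold the same names
theorem ignoreDirsB_eq : ignoreDirsB = ignoreDirsA := by decide

-- (head, tail) of python's cs.split('/')
def split1 : List Char → List Char × List (List Char)
  | [] => ([], [])
  | c :: r =>
    let p := split1 r
    if c = '/' then ([], p.1 :: p.2) else (c :: p.1, p.2)

-- proof-side reference scanner: char-by-char version of scanB
def scanSimple : List Char → Bool
  | [] => false
  | c :: r =>
    if c = '/' then (PySem.Set.contains ignoreDirsA (r.takeWhile (· ≠ '/')) || scanSimple r)
    else scanSimple r

theorem split1_head_takeWhile (cs : List Char) : (split1 cs).1 = cs.takeWhile (· ≠ '/') := by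
  induction cs with
  | nil => simp [split1]
  | cons c r ih =>
    by_cases hc : c = '/'
    · subst hc; simp [split1, List.takeWhile]
    · simp [split1, hc, List.takeWhile, ih]

theorem scanSimple_eq_anyTail (cs : List Char) :
    scanSimple cs = (split1 cs).2.any (fun p => PySem.Set.contains ignoreDirsA p) := by
  induction cs with
  | nil => simp [scanSimple, split1]
  | cons c r ih =>
    by_cases hc : c = '/'
    · subst hc
      simp [scanSimple, split1, ih, split1_head_takeWhile]
    · simp [scanSimple, split1, hc, ih]

theorem scanSimple_no_slash (cs : List Char) (h : '/' ∉ cs) : scanSimple cs = false := by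
  induction cs with
  | nil => rfl
  | cons c r ih =>
    have hc : c ≠ '/' := fun hh => h (hh ▸ List.mem_cons_self)
    simp only [scanSimple, if_neg hc]
    exact ih (fun hm => h (List.mem_cons_of_mem _ hm))

theorem scanSimple_append (pre l : List Char) (h : '/' ∉ pre) :
    scanSimple (pre ++ l) = scanSimple l := by
  induction pre with
  | nil => rfl
  | cons c r ih =>
    have hc : c ≠ '/' := fun hh => h (hh ▸ List.mem_cons_self)
    simp only [List.cons_append, scanSimple, if_neg hc]
    exact ih (fun hm => h (List.mem_cons_of_mem _ hm))

theorem singleton_prefix_iff {α : Type} (a : α) (l : List α) :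
    [a] <+: l ↔ ∃ t, l = a :: t := by
  cases l with
  | nil => simp
  | cons b t =>
    constructor
    · intro h
      obtain ⟨h1, _⟩ := List.cons_prefix_cons.mp h
      exact ⟨t, by rw [h1]⟩
    · rintro ⟨t', ht⟩
      rw [ht]
      exact List.cons_prefix_cons.mpr ⟨rfl, List.nil_prefix⟩

theorem singleton_infix_iff {α : Type} (a : α) (l : List α) :
    [a] <:+: l ↔ a ∈ l := by
  constructor
  · intro h
    exact List.singleton_sublist.mp h.sublist
  · intro h
    obtain ⟨s, t, ht⟩ := List.append_of_mem h
    exact ⟨s, t, by rw [ht]; simp⟩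

theorem takeWhile_eq_take (p : Char → Bool) (cs : List Char) (n : Nat) (hn : n < cs.length)
    (hall : ∀ i, (h : i < n) → p (cs[i]'(Nat.lt_trans h hn)) = true)
    (hfail : p (cs[n]'hn) = false) :
    cs.takeWhile p = cs.take n := by
  induction cs generalizing n with
  | nil => simp at hn
  | cons c r ih =>
    cases n with
    | zero =>
      simp only [List.getElem_cons_zero] at hfail
      rw [List.takeWhile_cons, if_neg (by simp [hfail]), List.take_zero]
    | succ m =>
      have hc : p c = true := hall 0 (Nat.succ_pos m)
      rw [List.takeWhile_cons, if_pos hc, List.take_succ_cons]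
      simp only [List.cons.injEq, true_and]
      exact ih m (by simpa using hn) (fun i hi => hall (i + 1) (Nat.succ_lt_succ hi)) (by simpa using hfail)

-- structure of cs at the first '/' found by find
theorem find_slash_structure (cs : List Char) (h : PySem.Chars.find cs ['/'] ≠ -1) :
    ∃ n : Nat, PySem.Chars.find cs ['/'] = (n : Int) ∧ n < cs.length ∧
      cs.take n = cs.takeWhile (· ≠ '/') ∧ '/' ∉ cs.take n ∧
      cs.drop n = '/' :: cs.drop (n + 1) := by
  have h0 : 0 ≤ PySem.Chars.find cs ['/'] := by
    have := PySem.Chars.neg_one_le_find cs ['/']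
    omega
  obtain ⟨hp, hmin⟩ := PySem.Chars.find_spec (s := cs) (sub := ['/']) h0
  set n := (PySem.Chars.find cs ['/']).toNat with hn
  obtain ⟨t, ht⟩ := (singleton_prefix_iff '/' (cs.drop n)).mp hp
  have hlen : n < cs.length := by
    by_contra hge
    rw [List.drop_eq_nil_of_le (by omega)] at ht
    exact absurd ht (by simp)
  have hgetn : cs[n]'hlen = '/' := by
    have h1 : cs[n]? = some '/' := by
      rw [← List.head?_drop, ht]; rfl
    rw [List.getElem?_eq_getElem hlen] at h1
    exact Option.some.inj h1
  have hgi : ∀ i, (hi : i < n) → cs[i]'(Nat.lt_trans hi hlen) ≠ '/' := by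
    intro i hi hc
    apply hmin i hi
    rw [singleton_prefix_iff]
    refine ⟨cs.drop (i + 1), ?_⟩
    rw [← hc]
    exact (List.getElem_cons_drop (by omega)).symm
  have htake : cs.take n = cs.takeWhile (· ≠ '/') := by
    rw [takeWhile_eq_take (· ≠ '/') cs n hlen
      (fun i hi => by
        have := hgi i hi
        simpa using this)
      (by simp [hgetn])]
  have hmem : '/' ∉ cs.take n := by
    intro hm
    obtain ⟨i, hi, hgeti⟩ := List.getElem_of_mem hm
    rw [List.getElem_take] at hgeti
    exact hgi i (by simp at hi; omega) hgeti
  have hdrop : cs.drop n = '/' :: cs.drop (n + 1) := by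
    rw [← hgetn]
    exact (List.getElem_cons_drop hlen).symm
  exact ⟨n, by omega, hlen, htake, hmem, hdrop⟩


theorem takeWhile_eq_self_of_no_slash (t : List Char) (h : '/' ∉ t) :
    t.takeWhile (· ≠ '/') = t := by
  induction t with
  | nil => rfl
  | cons c r ih =>
    have hc : c ≠ '/' := fun hh => h (hh ▸ List.mem_cons_self)
    rw [List.takeWhile_cons, if_pos (by simpa using hc),
      ih (fun hm => h (List.mem_cons_of_mem _ hm))]

-- comp = tail if j == -1 else tail[:j]  computes the component up to the next '/'
theorem comp_eq_takeWhile (t : List Char) :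
    (if PySem.Chars.find t ['/'] = -1 then t
     else PySem.List.slice t none (some (PySem.Chars.find t ['/'])))
      = t.takeWhile (· ≠ '/') := by
  by_cases hj : PySem.Chars.find t ['/'] = -1
  · rw [if_pos hj]
    have hns : '/' ∉ t := by
      intro hm
      exact (PySem.Chars.find_eq_neg_one_iff _ _).mp hj ((singleton_infix_iff '/' t).mpr hm)
    exact (takeWhile_eq_self_of_no_slash t hns).symm
  · obtain ⟨n, hfind, _, htake, _, _⟩ := find_slash_structure t hj
    rw [if_neg hj, hfind, PySem.List.slice_to_natCast, htake]

theorem scanB_eq_scanSimple (cs : List Char) : scanB cs = scanSimple cs := by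
  generalize hN : cs.length = N
  induction N using Nat.strong_induction_on generalizing cs with
  | _ N ih =>
    by_cases h : PySem.Chars.find cs ['/'] = -1
    · have hns : '/' ∉ cs := by
        intro hm
        exact (PySem.Chars.find_eq_neg_one_iff _ _).mp h ((singleton_infix_iff '/' cs).mpr hm)
      rw [scanSimple_no_slash cs hns, scanB.eq_def]
      simp [h]
    · obtain ⟨n, hfind, hlen, htake, hnotmem, hdrop⟩ := find_slash_structure cs h
      have htail : PySem.List.slice cs (some (PySem.Chars.find cs ['/'] + 1)) none
          = cs.drop (n + 1) := by
        rw [hfind]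
        have hcast : (n : Int) + 1 = ((n + 1 : Nat) : Int) := by push_cast; ring
        rw [hcast, PySem.List.slice_from_natCast]
      have hB : scanB cs
          = (PySem.Set.contains ignoreDirsB ((cs.drop (n + 1)).takeWhile (· ≠ '/'))
              || scanB (cs.drop (n + 1))) := by
        rw [scanB.eq_def]
        simp only [htail, dif_neg h, comp_eq_takeWhile]
      have hS : scanSimple cs
          = (PySem.Set.contains ignoreDirsA ((cs.drop (n + 1)).takeWhile (· ≠ '/'))
              || scanSimple (cs.drop (n + 1))) := by
        conv_lhs => rw [← List.take_append_drop n cs, hdrop]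
        rw [scanSimple_append _ _ hnotmem]
        simp [scanSimple]
      rw [hB, hS, ignoreDirsB_eq, ih (cs.drop (n + 1)).length (by simp; omega) _ rfl]

-- head component: (split1 cs).1 = d  ↔  d directly prefixes cs up to '/' or the end
theorem split1_head_eq (d : List Char) (hd : '/' ∉ d) :
    ∀ (cs : List Char), (split1 cs).1 = d ↔ (d ++ ['/'] <+: cs ∨ cs = d) := by
  intro cs
  induction cs generalizing d with
  | nil =>
    simp only [split1]
    constructor
    · intro h; exact Or.inr h
    · rintro (h | h)
      · exact absurd (List.eq_nil_of_prefix_nil h) (by simp)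
      · exact h
  | cons c r ih =>
    by_cases hc : c = '/'
    · subst hc
      simp only [split1]
      constructor
      · rintro rfl
        left; simp
      · rintro (h | rfl)
        · cases d with
          | nil => rfl
          | cons e d' =>
            exfalso
            have h2 : e :: (d' ++ ['/']) <+: '/' :: r := by simpa using h
            have : e = '/' := (List.cons_prefix_cons.mp h2).1
            exact hd (this ▸ List.mem_cons_self)
        · exact absurd List.mem_cons_self hd
    · simp only [split1, if_neg hc]
      cases d with
      | nil =>
        simp only [List.nil_append]
        constructor
        · intro h; simp at h
        · rintro (h | h)
          · have : '/' = c := by simpa using h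
            exact absurd this.symm hc
          · simp at h
      | cons e d' =>
        by_cases he : e = c
        · subst he
          have hd' : '/' ∉ d' := fun h => hd (List.mem_cons_of_mem _ h)
          constructor
          · intro h
            rw [List.cons.injEq] at h
            rcases (ih d' hd').mp h.2 with h2 | h2
            · left; simpa [List.cons_prefix_cons] using h2
            · right; simp [h2]
          · rintro (h | h)
            · have h2 : d' ++ ['/'] <+: r := by
                simpa [List.cons_prefix_cons] using h
              have := (ih d' hd').mpr (Or.inl h2)
              simp [this]
            · rw [List.cons.injEq] at h
              have := (ih d' hd').mpr (Or.inr h.2)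
              simp [this]
        · constructor
          · intro h
            rw [List.cons.injEq] at h
            exact absurd h.1.symm he
          · rintro (h | h)
            · have h2 : e :: (d' ++ ['/']) <+: c :: r := by simpa using h
              exact absurd (List.cons_prefix_cons.mp h2).1 he
            · rw [List.cons.injEq] at h
              exact absurd h.1.symm he

-- tail components: d ∈ (split1 cs).2 ↔ some suffix of cs is '/d/…' or exactly '/d'
theorem split1_tail_mem (d : List Char) (hd : '/' ∉ d) :
    ∀ (cs : List Char),
      d ∈ (split1 cs).2 ↔ ∃ t, t <:+ cs ∧ ('/' :: d ++ ['/'] <+: t ∨ t = '/' :: d) := by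
  intro cs
  induction cs with
  | nil =>
    simp only [split1]
    constructor
    · intro h; simp at h
    · rintro ⟨t, ht, hp⟩
      have := List.suffix_nil.mp ht
      subst this
      rcases hp with h | h
      · exact absurd (List.eq_nil_of_prefix_nil h) (by simp)
      · simp at h
  | cons c r ih =>
    have hsplit : ∀ t, t <:+ c :: r ↔ t = c :: r ∨ t <:+ r := by
      intro t; exact List.suffix_cons_iff.trans (by tauto)
    by_cases hc : c = '/'
    · subst hc
      simp only [split1]
      constructor
      · intro h
        rcases List.mem_cons.mp (by simpa using h) with h1 | h1
        · rcases (split1_head_eq d hd r).mp h1.symm with h2 | h2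
          · refine ⟨'/' :: r, List.suffix_refl _, Or.inl ?_⟩
            have h3 : '/' :: (d ++ ['/']) <+: '/' :: r := List.cons_prefix_cons.mpr ⟨rfl, h2⟩
            simpa using h3
          · exact ⟨'/' :: r, List.suffix_refl _, Or.inr (by simp [h2])⟩
        · rcases (ih).mp h1 with ⟨t, ht, hp⟩
          exact ⟨t, (hsplit t).mpr (Or.inr ht), hp⟩
      · rintro ⟨t, ht, hp⟩
        rcases (hsplit t).mp ht with rfl | ht'
        · have : (split1 r).1 = d := by
            apply (split1_head_eq d hd r).mpr
            rcases hp with h | h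
            · left
              have h2 : '/' :: (d ++ ['/']) <+: '/' :: r := by simpa using h
              exact (List.cons_prefix_cons.mp h2).2
            · right
              rw [List.cons.injEq] at h
              exact h.2
          simp [← this]
        · exact List.mem_cons_of_mem _ (ih.mpr ⟨t, ht', hp⟩)
    · simp only [split1, if_neg hc]
      constructor
      · intro h
        rcases ih.mp (by simpa using h) with ⟨t, ht, hp⟩
        exact ⟨t, (hsplit t).mpr (Or.inr ht), hp⟩
      · rintro ⟨t, ht, hp⟩
        rcases (hsplit t).mp ht with rfl | ht'
        · exfalso
          rcases hp with h | h
          · have h2 : '/' :: (d ++ ['/']) <+: c :: r := by simpa using h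
            exact hc (List.cons_prefix_cons.mp h2).1.symm
          · rw [List.cons.injEq] at h
            exact hc h.1
        · simpa using ih.mpr ⟨t, ht', hp⟩

theorem perD (d cs : List Char) (hd : '/' ∉ d) :
    (PySem.Chars.isIn ('/' :: d ++ ['/']) cs || PySem.Chars.endswith cs ('/' :: d)) = true
      ↔ d ∈ (split1 cs).2 := by
  rw [split1_tail_mem d hd cs]
  rw [Bool.or_eq_true, PySem.Chars.isIn_iff_infix, PySem.Chars.endswith_iff]
  constructor
  · rintro (h | h)
    · rcases List.infix_iff_prefix_suffix.mp h with ⟨t, hp, ht⟩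
      exact ⟨t, ht, Or.inl hp⟩
    · exact ⟨'/' :: d, h, Or.inr rfl⟩
  · rintro ⟨t, ht, h | rfl⟩
    · exact Or.inl (List.infix_iff_prefix_suffix.mpr ⟨t, h, ht⟩)
    · exact Or.inr ht

theorem ignoreDirs_no_slash : ∀ d ∈ ignoreDirsA, '/' ∉ d := by decide

-- ===== VERDICT (by name: the statement is the Claim_ definition above) =====
theorem should_ignore_spec : Claim_equal_should_ignore := by
  intro path _
  unfold Spec_should_ignore should_ignore should_ignore_alt
  rw [scanB_eq_scanSimple, scanSimple_eq_anyTail]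
  rw [Bool.eq_iff_iff, List.any_eq_true, List.any_eq_true]
  constructor
  · rintro ⟨d, hdmem, hcond⟩
    refine ⟨d, (perD d path.toList (ignoreDirs_no_slash d hdmem)).mp hcond, ?_⟩
    rw [PySem.Set.contains_eq_listContains]
    simpa using hdmem
  · rintro ⟨p, hp, hc⟩
    rw [PySem.Set.contains_eq_listContains] at hc
    simp only [List.contains_eq_mem, decide_eq_true_eq] at hc
    exact ⟨p, hc, (perD p path.toList (ignoreDirs_no_slash p hc)).mpr hp⟩
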